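-- pv_equiv track=rewrite | github.com/KarimElgammal/QuantumComputing | playing_with_cuQuantum/qiskit_to_cirq_conversion.py | _get_qubit_offsets
-- ===== SOURCE A (Python) =====
-- def _get_qubit_offsets(used_qubits):
--     # for simulation we need an array of qubits, so this function
--     # computes the offest into the array for each qubit type (in
--     # Qiskit's Shor setup)
--     qubit_offsets = {}
--     prev_count = 0
--     for q_name in ('up', 'down', 'aux'):
--         qubit_offsets[q_name] = prev_count
--         count = 0
--         for q in used_qubits:
--             if q_name in q:
--                 count += 1
--         prev_count += count
--     qubit_offsets['total'] = prev_count
--     return qubit_offsets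
-- ===== SOURCE B (Python) =====
-- def _get_qubit_offsets(used_qubits):
--     # One pass over used_qubits with three independent counters, then
--     # build the offsets dict directly from cumulative sums.
--     up = down = aux = 0
--     for q in used_qubits:
--         if 'up' in q:
--             up += 1
--         if 'down' in q:
--             down += 1
--         if 'aux' in q:
--             aux += 1
--     return {'up': 0, 'down': up, 'aux': up + down, 'total': up + down + aux}
-- ===== Notes on version B (the rewrite author's own statement) =====
-- stated objective: alternative
-- what changed: Replaces A's three separate scans of used_qubits (one per category, accumulating offsets inside the category loop) with a single pass maintaining three independent counters, after which the offsets dict is written down directly as cumulative sums.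
import Mathlib
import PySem

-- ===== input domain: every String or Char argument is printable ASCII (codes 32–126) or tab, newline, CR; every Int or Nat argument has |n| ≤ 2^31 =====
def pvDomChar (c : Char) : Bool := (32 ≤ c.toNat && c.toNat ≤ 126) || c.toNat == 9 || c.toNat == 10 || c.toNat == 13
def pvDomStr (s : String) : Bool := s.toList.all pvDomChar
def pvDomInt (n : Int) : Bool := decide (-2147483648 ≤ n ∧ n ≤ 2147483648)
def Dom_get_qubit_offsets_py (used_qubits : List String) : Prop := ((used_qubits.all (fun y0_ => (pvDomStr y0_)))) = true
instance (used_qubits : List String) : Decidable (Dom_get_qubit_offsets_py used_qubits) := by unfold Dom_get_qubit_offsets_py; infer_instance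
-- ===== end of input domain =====

-- B replaces A's three scans of used_qubits with one pass maintaining three counters (alternative decomposition; return value only).

-- ===== PORT A =====
-- A: for each name in ('up','down','aux') insert the running offset, then rescan used_qubits to count; finally insert 'total'.
def get_qubit_offsets_py (used_qubits : List String) : List (String × Int) :=
  let st := (["up", "down", "aux"]).foldl
    (fun (st : PySem.Dict String Int × Int) q_name =>
      let d := st.1.insert q_name st.2
      let count := used_qubits.foldl
        (fun c q => if PySem.Str.isIn q_name q then c + 1 else c) (0 : Int)
      (d, st.2 + count))
    (PySem.Dict.empty, 0)
  (st.1.insert "total" st.2).items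

-- ===== PORT B =====
-- B: one fold over used_qubits with three independent counters, then the dict written as cumulative sums.
def get_qubit_offsets_py_alt (used_qubits : List String) : List (String × Int) :=
  let t := used_qubits.foldl
    (fun (st : Int × Int × Int) q =>
      (if PySem.Str.isIn "up" q then st.1 + 1 else st.1,
       if PySem.Str.isIn "down" q then st.2.1 + 1 else st.2.1,
       if PySem.Str.isIn "aux" q then st.2.2 + 1 else st.2.2))
    ((0 : Int), (0 : Int), (0 : Int))
  [("up", 0), ("down", t.1), ("aux", t.1 + t.2.1), ("total", t.1 + t.2.1 + t.2.2)]

-- ===== PRECONDITION & SPEC =====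
def Spec_get_qubit_offsets_py (used_qubits : List String) (out : List (String × Int)) : Prop := out = get_qubit_offsets_py_alt used_qubits
instance (used_qubits : List String) (out : List (String × Int)) : Decidable (Spec_get_qubit_offsets_py used_qubits out) := by unfold Spec_get_qubit_offsets_py; infer_instance

-- ===== CLAIM (what is proved, stated in full; the proofs are below) =====
def Claim_equal_get_qubit_offsets_py : Prop := ∀ (used_qubits : List String), Dom_get_qubit_offsets_py used_qubits → Spec_get_qubit_offsets_py used_qubits (get_qubit_offsets_py used_qubits)

-- ===== LEMMAS AND PROOFS =====

theorem isIn_eta (s : String) : PySem.Str.isIn s = fun q => PySem.Chars.isIn s.toList q.toList :=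
  funext fun q => by simp [PySem.Str.isIn]

-- B's triple fold computes the three substring counts.
theorem tripleFold_eq (l : List String) (a b c : Int) :
    l.foldl
      (fun (st : Int × Int × Int) q =>
        (if PySem.Str.isIn "up" q then st.1 + 1 else st.1,
         if PySem.Str.isIn "down" q then st.2.1 + 1 else st.2.1,
         if PySem.Str.isIn "aux" q then st.2.2 + 1 else st.2.2))
      (a, b, c)
    = (a + (l.countP (fun q => PySem.Str.isIn "up" q) : Int),
       b + (l.countP (fun q => PySem.Str.isIn "down" q) : Int),
       c + (l.countP (fun q => PySem.Str.isIn "aux" q) : Int)) := by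
  induction l generalizing a b c with
  | nil => simp
  | cons x xs ih =>
    simp only [List.foldl_cons, List.countP_cons, ih]
    refine Prod.ext ?_ (Prod.ext ?_ ?_) <;> simp <;> split_ifs <;> push_cast <;> ring

theorem get_qubit_offsets_py_spec : Claim_equal_get_qubit_offsets_py := by
  intro used_qubits _
  show get_qubit_offsets_py used_qubits = get_qubit_offsets_py_alt used_qubits
  unfold get_qubit_offsets_py get_qubit_offsets_py_alt
  simp only [List.foldl_cons, List.foldl_nil, tripleFold_eq,
    PySem.List.foldl_if_add_one]
  simp [PySem.Dict.insert, PySem.Dict.empty, PySem.Dict.contains, isIn_eta]
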